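-- pv_equiv track=rewrite | github.com/soren-hub/Algebra | algebra.py | _sum_by_order
-- ===== SOURCE A (Python) =====
-- def _sum_by_order(terms):
--     aux=None
--     by_order=[]
--     plus = 0
--     for term in terms:
--         if aux==None:
--             aux=term[0]
--             plus=term[1]
--         elif aux==term[0]:
--             plus += term[1]
--         else:
--             by_order.append((aux,plus))
--             aux=term[0]
--             plus = term[1]
--     by_order.append((aux,plus))
--     return by_order
-- ===== SOURCE B (Python) =====
-- def _sum_by_order(terms):
--     # recursive run-splitting: peel the leading run of equal orders, recurse on the rest
--     if not terms:
--         return []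
--     key, val = terms[0]
--     i = 1
--     while i < len(terms) and terms[i][0] == key:
--         val += terms[i][1]
--         i += 1
--     return [(key, val)] + _sum_by_order(terms[i:])
-- ===== Notes on version B (the rewrite author's own statement) =====
-- stated objective: simpler
-- what changed: Replaced A's aux/plus/by_order state machine (with a sentinel None initial state and a trailing append) by a direct recursion that peels the leading run of equal-order terms and recurses on the rest.
-- outside the precondition, e.g. on _sum_by_order([]): A returns [(None, 0)], B returns []
import Mathlib
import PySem

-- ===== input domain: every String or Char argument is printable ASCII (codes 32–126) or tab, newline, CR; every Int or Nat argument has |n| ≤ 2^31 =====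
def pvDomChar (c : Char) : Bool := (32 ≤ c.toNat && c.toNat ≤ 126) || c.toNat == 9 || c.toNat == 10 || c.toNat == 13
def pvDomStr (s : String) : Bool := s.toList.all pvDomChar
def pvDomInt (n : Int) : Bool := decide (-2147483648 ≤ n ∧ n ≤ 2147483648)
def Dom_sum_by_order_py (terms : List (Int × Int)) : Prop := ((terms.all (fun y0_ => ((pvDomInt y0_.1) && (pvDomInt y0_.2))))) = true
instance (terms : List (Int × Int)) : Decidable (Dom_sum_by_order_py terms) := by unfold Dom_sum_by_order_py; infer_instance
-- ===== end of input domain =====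

-- B replaces A's aux/plus state machine by recursive run-splitting (simpler decomposition).
-- Pre_ excludes only the empty list, on which A returns [(None, 0)] — not a value of type List (Int × Int).

-- ===== PORT A =====
-- state: (aux : Option Int, plus : Int, by_order : List (Int × Int)); branches in A's order
def pvStepA (st : Option Int × Int × List (Int × Int)) (term : Int × Int) :
    Option Int × Int × List (Int × Int) :=
  match st with
  | (aux, plus, by_order) =>
    match aux with
    | none => (some term.1, term.2, by_order)
    | some a =>
      if a == term.1 then (some a, plus + term.2, by_order)
      else (some term.1, term.2, by_order ++ [(a, plus)])

def sum_by_order_py (terms : List (Int × Int)) : List (Int × Int) :=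
  match terms.foldl pvStepA (none, 0, []) with
  | (none, _, by_order) => by_order   -- Python would append (None, plus), outside the return type; excluded by Pre_
  | (some a, plus, by_order) => by_order ++ [(a, plus)]

-- ===== PORT B =====
def sum_by_order_py_alt : List (Int × Int) → List (Int × Int)
  | [] => []
  | (k, v) :: rest =>
    let run := rest.takeWhile (fun t => t.1 == k)
    let rest' := rest.dropWhile (fun t => t.1 == k)
    (k, v + (run.map Prod.snd).sum) :: sum_by_order_py_alt rest'
termination_by terms => terms.length
decreasing_by
  simp only [List.length_cons]
  exact Nat.lt_succ_of_le (List.length_dropWhile_le _ _)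

-- ===== PRECONDITION & SPEC =====
-- Pre_ excludes exactly the empty list: there A returns [(None, 0)], which is not of the declared type.
def Pre_sum_by_order_py (terms : List (Int × Int)) : Prop := terms ≠ []
instance (terms : List (Int × Int)) : Decidable (Pre_sum_by_order_py terms) := by
  unfold Pre_sum_by_order_py; infer_instance
def pvWitness_sum_by_order_py : (List (Int × Int)) := [(1, 2), (1, 3), (2, 4)]

def Spec_sum_by_order_py (terms : List (Int × Int)) (out : List (Int × Int)) : Prop := out = sum_by_order_py_alt terms
instance (terms : List (Int × Int)) (out : List (Int × Int)) : Decidable (Spec_sum_by_order_py terms out) := by unfold Spec_sum_by_order_py; infer_instance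

-- ===== CLAIM (what is proved, stated in full; the proofs are below) =====
def Claim_equal_sum_by_order_py : Prop := ∀ (terms : List (Int × Int)), Dom_sum_by_order_py terms → Pre_sum_by_order_py terms → Spec_sum_by_order_py terms (sum_by_order_py terms)

-- ===== LEMMAS AND PROOFS =====
def pvFinish (st : Option Int × Int × List (Int × Int)) : List (Int × Int) :=
  match st with
  | (none, _, by_order) => by_order
  | (some a, plus, by_order) => by_order ++ [(a, plus)]

theorem pvInv (terms : List (Int × Int)) :
    ∀ (a p : Int) (bo : List (Int × Int)),
      pvFinish (terms.foldl pvStepA (some a, p, bo)) = bo ++ sum_by_order_py_alt ((a, p) :: terms) := by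
  induction terms with
  | nil =>
    intro a p bo
    simp [pvFinish, sum_by_order_py_alt]
  | cons t ts ih =>
    intro a p bo
    by_cases h : a = t.1
    · have hb : (a == t.1) = true := by simp [h]
      simp only [List.foldl_cons, pvStepA, hb, if_true]
      rw [ih a (p + t.2) bo]
      subst h
      simp [sum_by_order_py_alt, List.takeWhile, List.dropWhile]
      ring
    · have hb : (a == t.1) = false := by simp [h]
      simp only [List.foldl_cons, pvStepA, hb]
      rw [if_neg (by simpa using h)]
      rw [ih t.1 t.2 (bo ++ [(a, p)])]
      have ht : ((t.1, t.2) : Int × Int) = t := rfl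
      have hb2 : (t.1 == a) = false := by simp; exact fun e => h e.symm
      simp only [sum_by_order_py_alt, List.takeWhile, List.dropWhile, hb2, ht]
      simp [sum_by_order_py_alt]

-- ===== VERDICT (by name: the statement is the Claim_ definition above) =====
theorem sum_by_order_py_spec : Claim_equal_sum_by_order_py := by
  intro terms _ hpre
  unfold Spec_sum_by_order_py
  match terms with
  | [] => exact absurd rfl hpre
  | t :: ts =>
    show sum_by_order_py (t :: ts) = _
    unfold sum_by_order_py
    simp only [List.foldl_cons, pvStepA]
    have := pvInv ts t.1 t.2 []
    simp only [List.nil_append] at this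
    rw [show (ts.foldl pvStepA (some t.1, t.2, []) |> pvFinish) = sum_by_order_py_alt ((t.1, t.2) :: ts) from this] at *
    cases hf : ts.foldl pvStepA (some t.1, t.2, []) with
    | mk aux rest =>
      have := pvInv ts t.1 t.2 []
      simp only [List.nil_append, hf] at this
      cases aux with
      | none => simp [pvFinish] at this; simpa [this.symm] using this
      | some a =>
        cases rest with
        | mk plus bo =>
          simp only [pvFinish] at this
          simpa [this]
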